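-- pv_equiv track=rewrite | github.com/Gopal-next/Daily-Solving | Daily Solving/GFG/string/Wrong Ball.py | countWrongPlacedBalls
-- ===== SOURCE A (Python) =====
-- def countWrongPlacedBalls(s):
--     # return len(s)
--     # code here
--     c = 0
--     for i in range(len(s)):
--         if s[i] == 'R' and (i+1) % 2 ==0:
--             c += 1
--         elif s[i] == 'B' and (i+1) % 2 !=0:
--             c +=1
--     return c
-- ===== SOURCE B (Python) =====
-- def countWrongPlacedBalls(s):
--     return s[1::2].count('R') + s[0::2].count('B')
-- ===== Notes on version B (the rewrite author's own statement) =====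
-- stated objective: simpler
-- what changed: Replaces the per-index loop that branches on character and index parity with a parity partition of the string by slicing (s[1::2], s[0::2]) and one count() per slice.
import Mathlib
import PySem

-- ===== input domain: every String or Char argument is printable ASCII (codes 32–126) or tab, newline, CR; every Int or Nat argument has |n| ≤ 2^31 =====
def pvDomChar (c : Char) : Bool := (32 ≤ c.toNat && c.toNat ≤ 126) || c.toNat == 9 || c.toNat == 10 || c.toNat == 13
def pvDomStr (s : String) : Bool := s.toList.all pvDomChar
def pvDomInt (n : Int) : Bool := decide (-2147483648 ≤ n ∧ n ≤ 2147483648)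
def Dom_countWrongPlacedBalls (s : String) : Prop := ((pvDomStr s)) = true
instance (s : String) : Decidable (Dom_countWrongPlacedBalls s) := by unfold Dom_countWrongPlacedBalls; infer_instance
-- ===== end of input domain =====

-- B replaces A's per-index loop (branching on character and index parity) with a parity
-- partition by slicing (s[1::2], s[0::2]) and one count per slice; objective: simpler.

-- ===== PORT A =====
-- for i in range(len(s)): branch on s[i] and (i+1) % 2, accumulating c
def countWrongPlacedBalls (s : String) : Int :=
  (PySem.List.pyRange 0 (PySem.Str.len s) 1).foldl
    (fun c i =>
      if PySem.List.pyGetD s.toList i ' ' = 'R' ∧ PySem.Int.mod (i + 1) 2 = 0 then c + 1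
      else if PySem.List.pyGetD s.toList i ' ' = 'B' ∧ PySem.Int.mod (i + 1) 2 ≠ 0 then c + 1
      else c) 0

-- ===== PORT B =====
-- s[1::2].count('R') + s[0::2].count('B')  (step-2 slices; step ≠ 0, so slice? always returns some)
def countWrongPlacedBalls_alt (s : String) : Int :=
  (((PySem.List.slice? s.toList (some 1) none 2).getD []).count 'R' : Int)
  + (((PySem.List.slice? s.toList (some 0) none 2).getD []).count 'B' : Int)

-- ===== PRECONDITION & SPEC =====
def Spec_countWrongPlacedBalls (s : String) (out : Int) : Prop := out = countWrongPlacedBalls_alt s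
instance (s : String) (out : Int) : Decidable (Spec_countWrongPlacedBalls s out) := by unfold Spec_countWrongPlacedBalls; infer_instance

-- ===== CLAIM (what is proved, stated in full; the proofs are below) =====
def Claim_equal_countWrongPlacedBalls : Prop := ∀ (s : String), Dom_countWrongPlacedBalls s → Spec_countWrongPlacedBalls s (countWrongPlacedBalls s)

-- ===== LEMMAS AND PROOFS =====

-- common specification: wrong count with a flag 'current 0-based position is even'
def wrongCount : List Char → Bool → Int
  | [], _ => 0
  | c :: cs, ev => (if (if ev then c = 'B' else c = 'R') then (1:Int) else 0) + wrongCount cs (!ev)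

-- elements at even 0-based positions
def evens {α : Type} : List α → List α
  | [] => []
  | [x] => [x]
  | x :: _ :: l => x :: evens l

theorem evens_cons {α : Type} (x : α) (t : List α) : evens (x :: t) = x :: evens t.tail := by
  cases t <;> rfl

-- A's loop over List.range, generalized by the index offset
theorem loopA (l : List Char) : ∀ (off : Nat) (init : Int),
    (List.range l.length).foldl
      (fun c k =>
        if l.getD k ' ' = 'R' ∧ (k + off + 1) % 2 = 0 then c + 1
        else if l.getD k ' ' = 'B' ∧ (k + off + 1) % 2 ≠ 0 then c + 1
        else c) init
    = init + wrongCount l (decide (off % 2 = 0)) := by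
  induction l with
  | nil => intro off init; simp [wrongCount]
  | cons x t ih =>
    intro off init
    rw [List.length_cons, List.range_succ_eq_map, List.foldl_cons, List.foldl_map]
    have h1 : ∀ (c : Int) (k : Nat),
        (if (x :: t).getD (k+1) ' ' = 'R' ∧ ((k+1) + off + 1) % 2 = 0 then c + 1
         else if (x :: t).getD (k+1) ' ' = 'B' ∧ ((k+1) + off + 1) % 2 ≠ 0 then c + 1
         else c)
        = (if t.getD k ' ' = 'R' ∧ (k + (off+1) + 1) % 2 = 0 then c + 1
           else if t.getD k ' ' = 'B' ∧ (k + (off+1) + 1) % 2 ≠ 0 then c + 1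
           else c) := by
      intro c k
      have : (k+1) + off + 1 = k + (off+1) + 1 := by omega
      simp [this]
    simp only [h1]
    rw [ih (off + 1)]
    by_cases h : off % 2 = 0
    · have h3 : (off + 1) % 2 = 1 := by omega
      simp [wrongCount, h, h3]
      by_cases hx : x = 'B' <;> simp [hx] <;> ring
    · have h3 : (off + 1) % 2 = 0 := by omega
      simp [wrongCount, h, h3]
      by_cases hx : x = 'R' <;> simp [hx] <;> ring

theorem portA_eq (s : String) : countWrongPlacedBalls s = wrongCount s.toList true := by
  unfold countWrongPlacedBalls
  rw [PySem.Str.len_eq, PySem.List.pyRange_zero_nat, List.foldl_map]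
  have h1 : ∀ (c : Int) (k : Nat),
      (if PySem.List.pyGetD s.toList (k : Int) ' ' = 'R' ∧ PySem.Int.mod ((k : Int) + 1) 2 = 0 then c + 1
       else if PySem.List.pyGetD s.toList (k : Int) ' ' = 'B' ∧ PySem.Int.mod ((k : Int) + 1) 2 ≠ 0 then c + 1
       else c)
      = (if s.toList.getD k ' ' = 'R' ∧ (k + 0 + 1) % 2 = 0 then c + 1
         else if s.toList.getD k ' ' = 'B' ∧ (k + 0 + 1) % 2 ≠ 0 then c + 1
         else c) := by
    intro c k
    have hm : PySem.Int.mod ((k : Int) + 1) 2 = (((k + 1) % 2 : Nat) : Int) := by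
      have h := PySem.Int.mod_natCast (k + 1) 2
      push_cast at h ⊢
      exact h
    rw [PySem.List.pyGetD_natCast, hm]
    have heq : (((k + 1) % 2 : Nat) : Int) = 0 ↔ (k + 0 + 1) % 2 = 0 := by
      constructor <;> intro h <;> omega
    simp only [ne_eq, heq]
  simp only [h1]
  rw [loopA s.toList 0 0]
  simp

-- a [a::2] slice (0 ≤ a ≤ len) is a filterMap of in-range lookups at a, a+2, …
theorem sliceStep2 {α : Type} (l : List α) (a : Int) (h0 : 0 ≤ a) (ha : a ≤ l.length) :
    PySem.List.slice? l (some a) none 2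
      = some (List.filterMap (fun k => l[a.toNat + 2*k]?) (List.range ((l.length - a.toNat + 1)/2))) := by
  simp only [PySem.List.slice?, PySem.List.sliceIndices]
  rw [if_neg (by norm_num : ¬ ((2:Int) = 0))]
  simp only [if_neg (by norm_num : ¬ ((2:Int) < 0)), if_neg (by omega : ¬ a < 0)]
  rw [min_eq_left ha]
  congr 1
  rw [if_pos (show (0:Int) < 2 by norm_num)]
  rw [show (if a < (l.length:Int) then (((l.length:Int) - a + 2 - 1) / 2).toNat else 0)
      = (l.length - a.toNat + 1) / 2 from by split_ifs <;> omega]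
  apply List.filterMap_congr
  intro k _
  congr 1
  omega

theorem slice_evens {α : Type} (l : List α) :
    PySem.List.slice? l (some 0) none 2 = some (evens l) := by
  rw [sliceStep2 l 0 le_rfl (by positivity)]
  congr 1
  simp only [Int.toNat_zero, Nat.zero_add, Nat.sub_zero]
  induction l using evens.induct with
  | case1 => simp [evens]
  | case2 x => simp [evens]
  | case3 x y t ih =>
    have hc : ((x :: y :: t).length + 1)/2 = ((t.length + 1)/2) + 1 := by
      simp; omega
    rw [hc, List.range_succ_eq_map, List.filterMap_cons, List.filterMap_map]
    simp only [Nat.mul_zero, List.getElem?_cons_zero]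
    show x :: _ = evens (x :: y :: t)
    rw [show evens (x :: y :: t) = x :: evens t from rfl]
    refine congrArg (List.cons x) ?_
    rw [← ih]
    apply List.filterMap_congr
    intro k _
    simp only [Function.comp]
    rw [show 2 * Nat.succ k = (2*k) + 1 + 1 by omega]
    simp

theorem slice_odds {α : Type} (x : α) (t : List α) :
    PySem.List.slice? (x :: t) (some 1) none 2 = some (evens t) := by
  rw [sliceStep2 (x :: t) 1 (by norm_num) (by simp)]
  rw [← slice_evens t, sliceStep2 t 0 le_rfl (by positivity)]
  refine congrArg some ?_
  rw [show ((x :: t).length - (1:Int).toNat + 1) / 2 = (t.length - (0:Int).toNat + 1) / 2 from by simp]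
  apply List.filterMap_congr
  intro k _
  rw [show (1:Int).toNat + 2*k = ((0:Int).toNat + 2*k) + 1 by omega]
  simp

theorem slice_odds_nil {α : Type} :
    PySem.List.slice? ([] : List α) (some 1) none 2 = some [] := by
  simp [PySem.List.slice?, PySem.List.sliceIndices]

-- the wrong count is 'R's at odd positions plus 'B's at even positions (both flags at once)
theorem wc_eq (l : List Char) :
    (wrongCount l true = ((evens l.tail).count 'R' : Int) + ((evens l).count 'B' : Int))
    ∧ (wrongCount l false = ((evens l).count 'R' : Int) + ((evens l.tail).count 'B' : Int)) := by
  induction l with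
  | nil => simp [wrongCount, evens]
  | cons x t ih =>
    rw [evens_cons]
    constructor
    · show (if x = 'B' then (1:Int) else 0) + wrongCount t false = _
      rw [ih.2]
      simp only [List.tail_cons, List.count_cons]
      by_cases hx : x = 'B' <;> simp [hx] <;> ring_nf
    · show (if x = 'R' then (1:Int) else 0) + wrongCount t true = _
      rw [ih.1]
      simp only [List.tail_cons, List.count_cons]
      by_cases hx : x = 'R' <;> simp [hx] <;> ring_nf

-- ===== VERDICT (by name: the statement is the Claim_ definition above) =====
theorem countWrongPlacedBalls_spec : Claim_equal_countWrongPlacedBalls := by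
  intro s _
  unfold Spec_countWrongPlacedBalls countWrongPlacedBalls_alt
  rw [portA_eq, (wc_eq s.toList).1]
  cases h : s.toList with
  | nil => simp [slice_evens, slice_odds_nil, evens]
  | cons x t => rw [slice_odds, slice_evens]; simp
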